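-- pv_equiv track=rewrite | github.com/wj1224/algorithm_solve | hackerrank/python/hackerrank_GreedyFlorist.py | getMinimumCost
-- ===== SOURCE A (Python) =====
-- def getMinimumCost(k, c):
-- 	c.sort()
-- 	p = dict()
-- 	for i in range(k):
-- 		p[i] = 0
-- 	answer = 0
-- 	idx = 0
-- 	for i in range(len(c) -1, -1, -1):
-- 		if p[idx] == 0:
-- 			p[idx] = 1
-- 			answer += c[i]
-- 		else:
-- 			answer += ((p[idx] + 1) * c[i])
-- 			p[idx] += 1
-- 		idx += 1
-- 		if idx == k:
-- 			idx = 0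
-- 	return answer
-- ===== SOURCE B (Python) =====
-- def getMinimumCost(k, c):
--     c.sort()
--     rev = c[::-1]
--     total = 0
--     mult = 1
--     while rev:
--         total += mult * sum(rev[:k])
--         rev = rev[k:]
--         mult += 1
--     return total
-- ===== Notes on version B (the rewrite author's own statement) =====
-- stated objective: alternative
-- what changed: Replaces A's per-flower loop with its counter dict, round-robin idx and zero/nonzero branch by a round-based while loop: each round slices off the k most expensive remaining flowers and charges the whole block at the current multiplier via sum(), so no per-customer state is kept.
import Mathlib
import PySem

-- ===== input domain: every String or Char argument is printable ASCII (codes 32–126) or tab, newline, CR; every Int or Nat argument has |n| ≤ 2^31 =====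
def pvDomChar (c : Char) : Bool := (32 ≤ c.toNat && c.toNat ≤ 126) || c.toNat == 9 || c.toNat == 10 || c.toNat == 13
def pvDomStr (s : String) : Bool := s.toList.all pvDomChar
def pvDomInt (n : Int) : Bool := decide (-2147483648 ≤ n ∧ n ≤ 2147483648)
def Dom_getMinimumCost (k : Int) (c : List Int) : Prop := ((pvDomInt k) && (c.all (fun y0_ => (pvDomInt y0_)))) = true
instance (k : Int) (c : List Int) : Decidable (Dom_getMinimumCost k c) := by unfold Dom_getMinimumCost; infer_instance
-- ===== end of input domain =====

-- B replaces A's per-flower loop (counter dict, round-robin idx, branch) by a round-based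
-- while loop that slices off the k most expensive remaining flowers per round and charges
-- the block at the current multiplier; the objective is an alternative decomposition.
-- Both A and B sort the argument list c in place; the equivalence proved is about the return value.


-- ===== PORT A =====
-- loop body of A's main for-loop; p[idx] is read with getD 0: inside Pre_ (1 ≤ k) the key
-- 0 ≤ idx < k is always present, so getD equals Python's p[idx] (KeyError cases are outside Pre_)
def pvStepA (k : Int) (cs : List Int) (st : Int × Int × PySem.Dict Int Int) (i : Int) :
    Int × Int × PySem.Dict Int Int :=
  let answer := st.1
  let idx := st.2.1
  let p := st.2.2
  let ap :=
    if p.getD idx 0 == 0 then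
      (answer + PySem.List.pyGetD cs i 0, p.insert idx 1)
    else
      (answer + (p.getD idx 0 + 1) * PySem.List.pyGetD cs i 0, p.insert idx (p.getD idx 0 + 1))
  let idx2 := idx + 1
  if idx2 == k then (ap.1, 0, ap.2) else (ap.1, idx2, ap.2)

def getMinimumCost (k : Int) (c : List Int) : Int :=
  let cs := PySem.List.sorted c (fun x => x)          -- c.sort()
  -- 'for i in range(k): p[i] = 0': every key 0..k-1 is fresh and distinct, so the inserts
  -- just append (i, 0); built by direct append so evaluation is linear — theorem pv_initdict below
  -- proves this term EQUAL to the literal insert-fold of A's loop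
  let p : PySem.Dict Int Int :=
    PySem.Dict.mk ((PySem.List.pyRange 0 k).map (fun i => (i, 0)))
  ((PySem.List.pyRange ((cs.length : Int) - 1) (-1) (-1)).foldl (pvStepA k cs) (0, 0, p)).1

-- ===== PORT B =====
-- B's 'while rev: total += mult * sum(rev[:k]); rev = rev[k:]; mult += 1'.
-- Fuel = rev.length: with 1 ≤ k each iteration strictly shortens rev, so the fuel
-- is never exhausted on inputs admitted by Pre_ (where Python's loop terminates).
def pvRoundsB (k : Int) : Nat → List Int → Int → Int → Int
  | 0, _, total, _ => total
  | fuel + 1, rev, total, mult =>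
    if rev = [] then total
    else pvRoundsB k fuel (PySem.List.slice rev (some k) none)
          (total + mult * (PySem.List.slice rev none (some k)).sum) (mult + 1)

def getMinimumCost_alt (k : Int) (c : List Int) : Int :=
  let cs := PySem.List.sorted c (fun x => x)          -- c.sort()
  let rev := (PySem.List.slice? cs none none (-1)).getD []   -- rev = c[::-1]
  pvRoundsB k rev.length rev 0 1

-- ===== PRECONDITION & SPEC =====
-- Pre_ excludes k ≤ 0 with nonempty c: there Python A raises KeyError (the dict p is empty),
-- and Python B's while loop does not terminate; no input on which A returns is excluded.
def Pre_getMinimumCost (k : Int) (c : List Int) : Prop := 1 ≤ k ∨ c = []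
instance (k : Int) (c : List Int) : Decidable (Pre_getMinimumCost k c) := by
  unfold Pre_getMinimumCost; infer_instance
def pvWitness_getMinimumCost : Int × List Int := (2, [3, 1, 2])

def Spec_getMinimumCost (k : Int) (c : List Int) (out : Int) : Prop := out = getMinimumCost_alt k c
instance (k : Int) (c : List Int) (out : Int) : Decidable (Spec_getMinimumCost k c out) := by
  unfold Spec_getMinimumCost; infer_instance

-- ===== CLAIM (what is proved, stated in full; the proofs are below) =====
def Claim_equal_getMinimumCost : Prop := ∀ (k : Int) (c : List Int), Dom_getMinimumCost k c → Pre_getMinimumCost k c → Spec_getMinimumCost k c (getMinimumCost k c)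

-- ===== LEMMAS AND PROOFS =====

-- A's init loop 'for i in range(k): p[i] = 0' as written (an insert-fold) equals the
-- appended literal used in the port: all keys are fresh and distinct
theorem pv_initdict (k : Int) :
    (PySem.List.pyRange 0 k).foldl (fun d i => d.insert i 0) (PySem.Dict.empty : PySem.Dict Int Int)
      = PySem.Dict.mk ((PySem.List.pyRange 0 k).map (fun i => (i, 0))) := by
  apply PySem.Dict.ext
  have h := PySem.Dict.items_foldl_insert_fresh (l := PySem.List.pyRange 0 k)
      (k := fun i => i) (v := fun _ => (0 : Int)) (d := PySem.Dict.empty)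
      (fun a _ => PySem.Dict.contains_empty a)
      (by simpa using PySem.List.nodup_pyRange_one 0 k)
  simpa using h

-- stepping j → j+1 of Euclidean div/mod by positive k (Python's //,% for positive k)
theorem pv_succ_div_mod (k x : Int) (hk : 0 < k) :
    (x % k + 1 = k → (x + 1) / k = x / k + 1 ∧ (x + 1) % k = 0) ∧
    (x % k + 1 ≠ k → (x + 1) / k = x / k ∧ (x + 1) % k = x % k + 1) := by
  have hadd := Int.mul_ediv_add_emod x k
  constructor
  · intro h2
    have e : x + 1 = k * (x / k + 1) := by linear_combination h2 - hadd
    refine ⟨?_, ?_⟩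
    · rw [e, Int.mul_ediv_cancel_left _ (ne_of_gt hk)]
    · rw [e, Int.mul_emod_right]
  · intro h2
    have hlt : x % k + 1 < k :=
      lt_of_le_of_ne (Int.emod_lt_of_pos x hk) h2
    have hnn : 0 ≤ x % k := Int.emod_nonneg x (ne_of_gt hk)
    have := (Int.ediv_emod_unique (a := x + 1) (b := k)
      (r := x % k + 1) (q := x / k) hk).mpr ⟨by linarith, by linarith, hlt⟩
    exact ⟨this.1, this.2⟩

-- A's dict-initialisation loop: every lookup with default 0 yields 0
theorem pv_dict0 (L : List Int) (d : PySem.Dict Int Int) (h : ∀ r : Int, d.getD r 0 = 0) :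
    ∀ r : Int, (L.foldl (fun d i => d.insert i 0) d).getD r 0 = 0 := by
  induction L generalizing d with
  | nil => exact h
  | cons a L ih =>
      intro r
      refine ih _ (fun r => ?_) r
      rw [PySem.Dict.getD_insert]
      split <;> simp [h]

-- A's main loop, characterised: after j completed steps (idx = j % k and p holding the
-- per-customer counts), folding over pyRange (m-1) (-1) (-1) adds ((j+t)/k + 1) * cs[m-1-t]
theorem pv_loopA (k : Int) (cs : List Int) (hk : 0 < k) :
    ∀ (m j : Nat) (ans : Int) (p : PySem.Dict Int Int),
    (∀ r : Int, 0 ≤ r → r < k → p.getD r 0 = (j : Int) / k + (if r < (j : Int) % k then 1 else 0)) →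
    ((PySem.List.pyRange ((m : Int) - 1) (-1) (-1)).foldl (pvStepA k cs) (ans, (j : Int) % k, p)).1
      = ans + ((List.range m).map
          (fun t : Nat => (((j : Int) + (t : Int)) / k + 1)
            * PySem.List.pyGetD cs ((m : Int) - 1 - (t : Int)) 0)).sum := by
  intro m
  induction m with
  | zero =>
      intro j ans p hp
      rw [PySem.List.pyRange_neg_one_eq_nil (by norm_num)]
      simp
  | succ m ih =>
      intro j ans p hp
      have hmodnn : 0 ≤ (j : Int) % k := Int.emod_nonneg _ (ne_of_gt hk)
      have hmodlt : (j : Int) % k < k := Int.emod_lt_of_pos _ hk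
      have hpj : p.getD ((j : Int) % k) 0 = (j : Int) / k := by
        rw [hp _ hmodnn hmodlt]; simp
      have hstep := pv_succ_div_mod k (j : Int) hk
      have hone : pvStepA k cs (ans, (j : Int) % k, p) ((m : Int) + 1 - 1)
          = (ans + ((j : Int) / k + 1) * PySem.List.pyGetD cs ((m : Int) + 1 - 1) 0,
             ((j + 1 : Nat) : Int) % k,
             p.insert ((j : Int) % k) ((j : Int) / k + 1)) := by
        unfold pvStepA
        dsimp only
        rw [hpj]
        have hap : (if ((j : Int) / k == 0) = true
              then (ans + PySem.List.pyGetD cs ((m : Int) + 1 - 1) 0, p.insert ((j : Int) % k) 1)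
              else (ans + ((j : Int) / k + 1) * PySem.List.pyGetD cs ((m : Int) + 1 - 1) 0,
                    p.insert ((j : Int) % k) ((j : Int) / k + 1)))
            = (ans + ((j : Int) / k + 1) * PySem.List.pyGetD cs ((m : Int) + 1 - 1) 0,
               p.insert ((j : Int) % k) ((j : Int) / k + 1)) := by
          by_cases hz : (j : Int) / k = 0
          · rw [hz]; norm_num
          · simp [hz]
        rw [hap]
        push_cast
        by_cases hm : (j : Int) % k + 1 = k
        · simp only [hm, beq_self_eq_true, if_true]
          rw [(hstep.1 hm).2]
        · simp only [beq_iff_eq, hm, if_false]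
          rw [(hstep.2 hm).2]
      have hp' : ∀ r : Int, 0 ≤ r → r < k →
          (p.insert ((j : Int) % k) ((j : Int) / k + 1)).getD r 0
            = ((j + 1 : Nat) : Int) / k + (if r < ((j + 1 : Nat) : Int) % k then 1 else 0) := by
        intro r hr0 hrk
        rw [PySem.Dict.getD_insert]
        push_cast
        by_cases hm : (j : Int) % k + 1 = k
        · obtain ⟨hd, he⟩ := hstep.1 hm
          rw [hd, he]
          split_ifs with h1 h2 h2
          · exact absurd h2 (not_lt.mpr hr0)
          · ring
          · exact absurd h2 (not_lt.mpr hr0)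
          · rw [hp r hr0 hrk]
            have hrlt : r < (j : Int) % k := by
              rcases lt_or_ge r ((j : Int) % k) with h | h
              · exact h
              · exact absurd (lt_of_le_of_ne h (Ne.symm h1)) (by linarith)
            rw [if_pos hrlt]; ring
        · obtain ⟨hd, he⟩ := hstep.2 hm
          rw [hd, he]
          split_ifs with h1 h2 h2
          · ring
          · exact absurd (by rw [h1]; linarith : r < (j : Int) % k + 1) h2
          · rw [hp r hr0 hrk]
            have hrlt : r < (j : Int) % k := by
              rcases lt_or_ge r ((j : Int) % k) with h | h
              · exact h
              · exact absurd (lt_of_le_of_ne h (Ne.symm h1)) (by linarith)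
            rw [if_pos hrlt]
          · rw [hp r hr0 hrk]
            have hrge : ¬ r < (j : Int) % k := by linarith
            rw [if_neg hrge]
      have hcons : PySem.List.pyRange ((↑(m + 1) : Int) - 1) (-1) (-1)
          = ((m : Int) + 1 - 1) :: PySem.List.pyRange ((m : Int) - 1) (-1) (-1) := by
        push_cast
        rw [PySem.List.pyRange_neg_one_cons (by omega)]
        norm_num
      rw [hcons, List.foldl_cons, hone, ih (j + 1) _ _ hp', List.range_succ_eq_map]
      simp only [List.map_cons, List.map_map, List.sum_cons]
      push_cast
      ring_nf
      congr 1
      congr 1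
      apply List.map_congr_left
      intro t ht
      simp only [Function.comp_apply, Nat.succ_eq_add_one]
      push_cast
      ring_nf

-- sum of a constant-multiplier indexed sum is mult * list sum
theorem pv_mul_sum (mult : Int) : ∀ (L : List Int),
    ((List.range L.length).map (fun t : Nat => mult * L.getD t 0)).sum = mult * L.sum := by
  intro L
  induction L with
  | nil => simp
  | cons a l ihl =>
      rw [List.length_cons, List.range_succ_eq_map, List.map_cons, List.map_map,
          List.sum_cons]
      simp only [List.getD_cons_zero]
      have : (List.range l.length).map ((fun t : Nat => mult * (a :: l).getD t 0) ∘ (fun t => t + 1))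
          = (List.range l.length).map (fun t : Nat => mult * l.getD t 0) := by
        apply List.map_congr_left
        intro t _
        simp
      rw [this, ihl]
      simp [List.sum_cons]; ring

-- B's while loop, characterised: with K ≥ 1 and enough fuel, the rounds compute
-- total + Σ_{t < rev.length} (t/K + mult) * rev[t]
theorem pv_roundsB (K : Nat) (hK : 1 ≤ K) :
    ∀ (fuel : Nat) (rev : List Int) (total mult : Int), rev.length ≤ fuel →
    pvRoundsB (K : Int) fuel rev total mult
      = total + ((List.range rev.length).map
          (fun t : Nat => (((t / K : Nat) : Int) + mult) * rev.getD t 0)).sum := by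
  intro fuel
  induction fuel with
  | zero =>
      intro rev total mult hle
      have : rev = [] := List.length_eq_zero_iff.mp (Nat.le_zero.mp hle)
      subst this; simp [pvRoundsB]
  | succ fuel ih =>
      intro rev total mult hle
      by_cases hnil : rev = []
      · subst hnil; simp [pvRoundsB]
      · have hlen : 0 < rev.length := List.length_pos_iff.mpr hnil
        rw [pvRoundsB, if_neg hnil,
            PySem.List.slice_from_natCast, PySem.List.slice_to_natCast,
            ih _ _ _ (by simp; omega)]
        -- split the sum at K
        rcases Nat.le_total rev.length K with hsmall | hbig
        · -- one round consumes everything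
          have hdrop : rev.drop K = [] := List.drop_eq_nil_of_le hsmall
          have htake : rev.take K = rev := List.take_of_length_le hsmall
          rw [hdrop, htake]
          simp only [List.length_nil, List.range_zero, List.map_nil, List.sum_nil, add_zero]
          have hmap : ((List.range rev.length).map
              (fun t : Nat => (((t / K : Nat) : Int) + mult) * rev.getD t 0))
                = (List.range rev.length).map (fun t : Nat => mult * rev.getD t 0) := by
            apply List.map_congr_left
            intro t ht
            have : t / K = 0 := Nat.div_eq_of_lt (lt_of_lt_of_le (List.mem_range.mp ht) hsmall)
            rw [this]; push_cast; ring
          rw [hmap]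
          rw [pv_mul_sum mult rev]
        · -- rev = take K ++ drop K, split List.range at K
          have hlen2 : rev.length = K + (rev.length - K) := by omega
          rw [hlen2, List.range_add, List.map_append, List.sum_append, List.map_map]
          have h1 : ((List.range K).map
              (fun t : Nat => (((t / K : Nat) : Int) + mult) * rev.getD t 0))
                = (List.range K).map (fun t : Nat => mult * rev.getD t 0) := by
            apply List.map_congr_left
            intro t ht
            rw [Nat.div_eq_of_lt (List.mem_range.mp ht)]; push_cast; ring
          have h2 : ((List.range (rev.length - K)).map
              ((fun t : Nat => (((t / K : Nat) : Int) + mult) * rev.getD t 0) ∘ (fun s => K + s)))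
                = (List.range (rev.length - K)).map
                    (fun s : Nat => (((s / K : Nat) : Int) + (mult + 1)) * (rev.drop K).getD s 0) := by
            apply List.map_congr_left
            intro s hs
            simp only [Function.comp_apply]
            have hdiv : (K + s) / K = s / K + 1 := by
              rw [Nat.add_comm, Nat.add_div_right _ (by omega)]
            have hget : rev.getD (K + s) 0 = (rev.drop K).getD s 0 := by
              rw [List.getD_eq_getElem?_getD, List.getD_eq_getElem?_getD,
                  List.getElem?_drop]
            rw [hdiv, hget]; push_cast; ring
          rw [h1, h2]
          have hsum1 : ((List.range K).map (fun t : Nat => mult * rev.getD t 0)).sum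
              = mult * (rev.take K).sum := by
            have h3 : ((List.range K).map (fun t : Nat => mult * rev.getD t 0))
                = (List.range (rev.take K).length).map (fun t : Nat => mult * (rev.take K).getD t 0) := by
              rw [List.length_take, Nat.min_eq_left hbig]
              apply List.map_congr_left
              intro t ht
              rw [List.getD_eq_getElem?_getD, List.getD_eq_getElem?_getD, List.getElem?_take,
                  if_pos (List.mem_range.mp ht)]
            rw [h3, pv_mul_sum]
          rw [hsum1]
          have hlen3 : rev.length - K = (rev.drop K).length := by simp
          rw [hlen3]; ring

-- both ports reduce to the same division sum over the sorted list
theorem pv_common (k : Int) (c : List Int) (hk : 1 ≤ k) :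
    getMinimumCost k c = getMinimumCost_alt k c := by
  have hkpos : 0 < k := by omega
  unfold getMinimumCost getMinimumCost_alt
  dsimp only
  set cs := PySem.List.sorted c (fun x => x) with hcs
  -- A's side
  have h0 : ∀ r : Int,
      (PySem.Dict.mk ((PySem.List.pyRange 0 k).map (fun i => (i, 0)))
        : PySem.Dict Int Int).getD r 0 = 0 := by
    intro r
    rw [← pv_initdict]
    exact pv_dict0 _ _ (fun r => PySem.Dict.getD_empty r 0) r
  have hinv : ∀ r : Int, 0 ≤ r → r < k →
      (PySem.Dict.mk ((PySem.List.pyRange 0 k).map (fun i => (i, 0)))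
        : PySem.Dict Int Int).getD r 0
        = ((0 : Nat) : Int) / k + (if r < ((0 : Nat) : Int) % k then 1 else 0) := by
    intro r hr0 _
    rw [h0]
    simp [not_lt.mpr hr0]
  have hA := pv_loopA k cs hkpos cs.length 0 0 _ hinv
  simp only [Nat.cast_zero, Int.zero_emod, zero_add] at hA
  rw [hA]
  -- B's side
  rw [PySem.List.slice?_none_none_neg_one]
  simp only [Option.getD_some]
  set K := k.toNat with hKdef
  have hkK : (K : Int) = k := Int.toNat_of_nonneg (by omega)
  have hB := pv_roundsB K (by omega) cs.reverse.length cs.reverse 0 1 (le_refl _)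
  rw [hkK] at hB
  rw [hB, zero_add, List.length_reverse]
  -- identical term-by-term sums
  apply congrArg List.sum
  apply List.map_congr_left
  intro t ht
  have htn : t < cs.length := List.mem_range.mp ht
  have hgetrev : cs.reverse.getD t 0 = PySem.List.pyGetD cs ((cs.length : Int) - 1 - (t : Int)) 0 := by
    rw [PySem.List.pyGetD_eq_getElem (xs := cs) (i := (cs.length : Int) - 1 - (t : Int)) (d := 0)
        (by omega) (by omega)]
    rw [List.getD_eq_getElem?_getD, List.getElem?_eq_getElem (by simpa using htn)]
    simp only [Option.getD_some, List.getElem_reverse]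
    congr 1
    omega
  rw [hgetrev]
  have hdiv : ((t / K : Nat) : Int) = (t : Int) / k := by
    rw [← hkK]
    exact_mod_cast (Int.natCast_div t K).symm
  rw [hdiv]

-- ===== VERDICT (by name: the statement is the Claim_ definition above) =====
theorem getMinimumCost_spec : Claim_equal_getMinimumCost := by
  intro k c _ hpre
  unfold Spec_getMinimumCost
  rcases hpre with hk | hc
  · exact (pv_common k c hk).symm ▸ rfl
  · subst hc
    rfl
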